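-- pv_equiv track=rewrite | github.com/jupyter471/Algorithm | 프로그래머스/1/77884. 약수의 개수와 덧셈/약수의 개수와 덧셈.py | count
-- ===== SOURCE A (Python) =====
-- def count(num):
--     cnt = 0
--     for i in range(1,num+1):
--         if num % i == 0:
--             cnt += 1
--     if cnt % 2 == 0:
--         return num
--     else:
--         return -1 * num
-- ===== SOURCE B (Python) =====
-- def count(num):
--     # num has an odd number of divisors iff it is a perfect square;
--     # find the integer square root by binary search (O(log num)).
--     lo, hi = 0, num
--     while lo < hi:
--         mid = (lo + hi + 1) // 2
--         if mid * mid <= num: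
--             lo = mid
--         else:
--             hi = mid - 1
--     return -num if lo * lo == num else num
-- ===== Notes on version B (the rewrite author's own statement) =====
-- stated objective: faster
-- what changed: Replaces the O(n) trial loop counting divisors by the number-theoretic fact that the divisor count is odd iff num is a perfect square, tested with a binary-search integer square root.
import Mathlib
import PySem

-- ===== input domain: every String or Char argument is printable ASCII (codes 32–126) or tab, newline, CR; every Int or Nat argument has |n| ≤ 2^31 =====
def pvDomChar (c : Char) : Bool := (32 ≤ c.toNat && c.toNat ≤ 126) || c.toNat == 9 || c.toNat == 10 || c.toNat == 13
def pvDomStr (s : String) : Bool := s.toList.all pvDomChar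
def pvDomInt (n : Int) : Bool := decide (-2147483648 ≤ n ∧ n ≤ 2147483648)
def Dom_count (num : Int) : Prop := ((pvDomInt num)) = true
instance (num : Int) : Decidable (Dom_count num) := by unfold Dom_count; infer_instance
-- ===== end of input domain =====

-- B replaces A's O(num) divisor-counting loop by the fact that the divisor count is odd
-- iff num is a perfect square, tested with a binary-search integer square root.

-- ===== PORT A =====
def count (num : Int) : Int :=
  let cnt : Int := (PySem.List.pyRange 1 (num + 1) 1).foldl
      (fun cnt i => if PySem.Int.mod num i == 0 then cnt + 1 else cnt) 0
  if PySem.Int.mod cnt 2 == 0 then num else -1 * num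

-- ===== PORT B =====
-- the 'while lo < hi' binary-search loop of Source B
def countBsearch (num lo hi : Int) : Int :=
  if h : lo < hi then
    let mid := PySem.Int.floordiv (lo + hi + 1) 2
    if mid * mid ≤ num then countBsearch num mid hi
    else countBsearch num lo (mid - 1)
  else lo
termination_by (hi - lo).toNat
decreasing_by
  · have := PySem.Int.floordiv_two_mid_bounds (lo := lo + 1) (hi := hi) (by omega)
    have h1 : lo + 1 + hi = lo + hi + 1 := by ring
    rw [h1] at this
    omega
  · have := PySem.Int.floordiv_two_mid_bounds (lo := lo + 1) (hi := hi) (by omega)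
    have h1 : lo + 1 + hi = lo + hi + 1 := by ring
    rw [h1] at this
    omega

def count_alt (num : Int) : Int :=
  let lo := countBsearch num 0 num
  if lo * lo == num then -num else num

-- ===== PRECONDITION & SPEC =====
def Spec_count (num : Int) (out : Int) : Prop := out = count_alt num
instance (num : Int) (out : Int) : Decidable (Spec_count num out) := by unfold Spec_count; infer_instance

-- ===== CLAIM (what is proved, stated in full; the proofs are below) =====
def Claim_equal_count : Prop := ∀ (num : Int), Dom_count num → Spec_count num (count num)

-- ===== LEMMAS AND PROOFS =====

-- Parity of the cardinality of a finite set closed under an involution equals the parity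
-- of its set of fixed points (remove a non-fixed pair {a, f a} and recurse).
lemma card_parity_filter_fixed {α : Type} [DecidableEq α] (f : α → α) :
    ∀ (n : ℕ) (s : Finset α), s.card = n → (∀ a ∈ s, f a ∈ s) → (∀ a ∈ s, f (f a) = a) →
    s.card % 2 = ({a ∈ s | f a = a}).card % 2 := by
  intro n
  induction n using Nat.strong_induction_on with
  | _ n ih =>
    intro s hcard hmem hinv
    by_cases hex : ∃ a ∈ s, f a ≠ a
    · obtain ⟨a, ha, hfa⟩ := hex
      have hfas : f a ∈ s := hmem a ha
      have hfaea : f a ∈ s.erase a := Finset.mem_erase.mpr ⟨hfa, hfas⟩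
      set t := (s.erase a).erase (f a) with ht
      have hcards : s.card = t.card + 2 := by
        rw [ht, Finset.card_erase_of_mem hfaea, Finset.card_erase_of_mem ha]
        have h1 : 0 < s.card := Finset.card_pos.mpr ⟨a, ha⟩
        have h2 : 0 < (s.erase a).card := Finset.card_pos.mpr ⟨f a, hfaea⟩
        rw [Finset.card_erase_of_mem ha] at h2
        omega
      have htmem : ∀ b ∈ t, b ∈ s ∧ b ≠ a ∧ b ≠ f a := by
        intro b hb
        rw [ht] at hb
        simp only [Finset.mem_erase] at hb
        exact ⟨hb.2.2, hb.2.1, hb.1⟩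
      have htsub : ∀ b ∈ t, f b ∈ t := by
        intro b hb
        obtain ⟨hbs, hba, hbfa⟩ := htmem b hb
        have hfbs : f b ∈ s := hmem b hbs
        have h1 : f b ≠ f a := fun h => hba (by
          have := congrArg f h
          rwa [hinv b hbs, hinv a ha] at this)
        have h2 : f b ≠ a := fun h => hbfa (by
          have := congrArg f h
          rwa [hinv b hbs] at this)
        rw [ht]; exact Finset.mem_erase.mpr ⟨h1, Finset.mem_erase.mpr ⟨h2, hfbs⟩⟩
      have htinv : ∀ b ∈ t, f (f b) = b := fun b hb => hinv b (htmem b hb).1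
      have hfilter : {x ∈ s | f x = x} = {x ∈ t | f x = x} := by
        apply Finset.ext
        intro x
        simp only [Finset.mem_filter]
        constructor
        · rintro ⟨hxs, hfx⟩
          have hxa : x ≠ a := by rintro rfl; exact hfa hfx
          have hxfa : x ≠ f a := by rintro rfl; exact hfa (((hinv a ha).symm.trans hfx).symm)
          exact ⟨Finset.mem_erase.mpr ⟨hxfa, Finset.mem_erase.mpr ⟨hxa, hxs⟩⟩, hfx⟩
        · rintro ⟨hxt, hfx⟩
          exact ⟨(htmem x hxt).1, hfx⟩
      have := ih t.card (by omega) t rfl htsub htinv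
      rw [hcards, hfilter]
      omega
    · push Not at hex
      rw [Finset.filter_true_of_mem hex]

-- A number ≥ 1 has an odd number of divisors iff it is a perfect square
-- (the involution d ↦ n / d on the divisors fixes at most the square root).
lemma divisors_card_parity (n : ℕ) (hn : n ≠ 0) :
    (n.divisors.card % 2 = 1) ↔ Nat.sqrt n * Nat.sqrt n = n := by
  have hmem : ∀ d ∈ n.divisors, n / d ∈ n.divisors := by
    intro d hd
    rw [Nat.mem_divisors] at hd ⊢
    exact ⟨Nat.div_dvd_of_dvd hd.1, hn⟩
  have hinv : ∀ d ∈ n.divisors, n / (n / d) = d := by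
    intro d hd
    rw [Nat.mem_divisors] at hd
    exact Nat.div_div_self hd.1 hn
  have hpar := card_parity_filter_fixed (fun d => n / d) n.divisors.card n.divisors rfl hmem hinv
  have hfix : ∀ d ∈ n.divisors, (n / d = d ↔ d * d = n) := by
    intro d hd
    rw [Nat.mem_divisors] at hd
    have hd0 : 0 < d := Nat.pos_of_dvd_of_pos hd.1 (Nat.pos_of_ne_zero hn)
    constructor
    · intro h
      have := Nat.div_mul_cancel hd.1
      rw [h] at this; exact this
    · intro h
      rw [← h]; exact Nat.mul_div_cancel_left d hd0
  by_cases hsq : Nat.sqrt n * Nat.sqrt n = n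
  · have hfilter : {d ∈ n.divisors | n / d = d} = {Nat.sqrt n} := by
      apply Finset.eq_singleton_iff_unique_mem.mpr
      constructor
      · have hs : Nat.sqrt n ∈ n.divisors :=
          Nat.mem_divisors.mpr ⟨Dvd.intro _ hsq, hn⟩
        exact Finset.mem_filter.mpr ⟨hs, (hfix _ hs).mpr hsq⟩
      · intro x hx
        obtain ⟨hxs, hfx⟩ := Finset.mem_filter.mp hx
        have hxx : x * x = n := (hfix x hxs).mp hfx
        exact Nat.mul_self_inj.mp (hxx.trans hsq.symm)
    rw [hfilter] at hpar
    simp at hpar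
    simp [hsq, hpar]
  · have hfilter : {d ∈ n.divisors | n / d = d} = ∅ := by
      apply Finset.filter_eq_empty_iff.mpr
      intro x hxs h
      have hxx : x * x = n := (hfix x hxs).mp h
      exact hsq (by rw [← hxx, Nat.sqrt_eq x])
    rw [hfilter] at hpar
    simp at hpar
    simp [hsq]
    omega

-- The number of divisors as a count over range n.
lemma divisors_card_countP (n : ℕ) :
    n.divisors.card = (List.range n).countP (fun k => decide ((k + 1) ∣ n)) := by
  rcases Nat.eq_zero_or_pos n with h0 | h0
  · simp [h0]
  · have hb : n.divisors.card = ((Finset.range n).filter (fun k => decide ((k + 1) ∣ n))).card := by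
      refine Finset.card_bij' (fun d _ => d - 1) (fun k _ => k + 1) ?hi ?hj ?li ?ri
      case hi =>
        intro d hd
        rw [Nat.mem_divisors] at hd
        have h1 : 1 ≤ d := Nat.pos_of_dvd_of_pos hd.1 h0
        have h2 : d ≤ n := Nat.le_of_dvd h0 hd.1
        simp only [Finset.mem_filter, Finset.mem_range, decide_eq_true_eq]
        exact ⟨by omega, by rw [Nat.sub_add_cancel h1]; exact hd.1⟩
      case hj =>
        intro k hk
        simp only [Finset.mem_filter, decide_eq_true_eq] at hk
        exact Nat.mem_divisors.mpr ⟨hk.2, by omega⟩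
      case li =>
        intro d hd
        rw [Nat.mem_divisors] at hd
        have h1 : 1 ≤ d := Nat.pos_of_dvd_of_pos hd.1 h0
        show d - 1 + 1 = d
        omega
      case ri => intro k hk; show k + 1 - 1 = k; omega
    rw [hb]
    simp [Finset.filter, Finset.card, Finset.range, Multiset.range, List.countP_eq_length_filter]

-- A's loop counts the divisors.
lemma count_cnt_eq (num : Int) (h : 0 ≤ num) :
    (PySem.List.pyRange 1 (num + 1) 1).foldl
      (fun cnt i => if PySem.Int.mod num i == 0 then cnt + 1 else cnt) (0 : Int)
    = (num.toNat.divisors.card : Int) := by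
  set n := num.toNat with hn
  have hnum : num = (n : Int) := by omega
  have hba : (num + 1 - 1).toNat = n := by omega
  rw [PySem.List.foldl_if_add_one, PySem.List.pyRange_one, hba, List.countP_map]
  have hcongr : List.countP ((fun i => PySem.Int.mod num i == 0) ∘ (fun k : ℕ => (1:Int) + (k:Int)))
      (List.range n) = List.countP (fun k => decide ((k + 1) ∣ n)) (List.range n) := by
    apply List.countP_congr
    intro k hk
    simp only [Function.comp_apply, PySem.Int.mod_eq_zero_iff_dvd, beq_iff_eq, decide_eq_true_eq]
    rw [hnum, show (1 : Int) + (k : Int) = ((k + 1 : ℕ) : Int) by push_cast; ring]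
    exact Int.natCast_dvd_natCast
  rw [hcongr, ← divisors_card_countP]
  simp

-- B's binary search brackets the square root.
lemma countBsearch_spec (num : Int) :
    ∀ (n : ℕ) (lo hi : Int), (hi - lo).toNat = n → 0 ≤ lo → lo ≤ hi →
      lo * lo ≤ num → num < (hi + 1) * (hi + 1) →
      0 ≤ countBsearch num lo hi ∧
      countBsearch num lo hi * countBsearch num lo hi ≤ num ∧
      num < (countBsearch num lo hi + 1) * (countBsearch num lo hi + 1) := by
  intro n
  induction n using Nat.strong_induction_on with
  | _ n ih =>
    intro lo hi hn hlo hlohi hlosq hhisq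
    rw [countBsearch]
    by_cases h : lo < hi
    · simp only [h, dite_true]
      have hmid := PySem.Int.floordiv_two_mid_bounds (lo := lo + 1) (hi := hi) (by omega)
      rw [show lo + 1 + hi = lo + hi + 1 by ring] at hmid
      set mid := PySem.Int.floordiv (lo + hi + 1) 2 with hm
      by_cases hsq : mid * mid ≤ num
      · simp only [hsq, ite_true]
        exact ih (hi - mid).toNat (by omega) mid hi rfl (by omega) (by omega) hsq hhisq
      · simp only [hsq, ite_false]
        have : num < (mid - 1 + 1) * (mid - 1 + 1) := by
          rw [show mid - 1 + 1 = mid by ring]; omega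
        exact ih (mid - 1 - lo).toNat (by omega) lo (mid - 1) rfl hlo (by omega) hlosq this
    · simp only [h, dite_false]
      have : lo = hi := by omega
      subst this
      exact ⟨hlo, hlosq, hhisq⟩

-- B's test 'lo * lo == num' is the perfect-square test.
lemma countBsearch_sq_iff (num : Int) (h : 0 ≤ num) :
    (countBsearch num 0 num * countBsearch num 0 num = num) ↔
      Nat.sqrt num.toNat * Nat.sqrt num.toNat = num.toNat := by
  obtain ⟨hr0, hrle, hrlt⟩ := countBsearch_spec num (num - 0).toNat 0 num rfl le_rfl h
    (by omega) (by nlinarith)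
  set r := countBsearch num 0 num with hr
  constructor
  · intro hsq
    have hnn : r.toNat * r.toNat = num.toNat := by
      zify
      rw [Int.toNat_of_nonneg hr0, Int.toNat_of_nonneg h]
      exact hsq
    rw [← hnn, Nat.sqrt_eq]
  · intro hsq
    have hm : ((Nat.sqrt num.toNat : Int)) * ((Nat.sqrt num.toNat : Int)) = num := by
      have h2 : ((Nat.sqrt num.toNat * Nat.sqrt num.toNat : ℕ) : Int) = ((num.toNat : ℕ) : Int) := by
        exact_mod_cast congrArg (fun x : ℕ => (x : Int)) hsq
      push_cast at h2
      rwa [Int.toNat_of_nonneg h] at h2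
    set m := ((Nat.sqrt num.toNat : Int)) with hmdef
    have hm0 : 0 ≤ m := by positivity
    have h1 : r ≤ m := by nlinarith
    have h2 : m ≤ r := by nlinarith
    rw [le_antisymm h1 h2, hm]

lemma count_alt_nonpos (num : Int) (h : num ≤ 0) : count_alt num = num := by
  unfold count_alt
  rw [countBsearch]
  simp only [show ¬((0:Int) < num) from by omega, dite_false]
  by_cases h0 : num = 0
  · simp [h0]
  · simp only [beq_iff_eq]
    rw [if_neg (by omega)]

-- ===== VERDICT (by name: the statement is the Claim_ definition above) =====
theorem count_spec : Claim_equal_count := by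
  intro num _
  unfold Spec_count count
  by_cases hpos : 0 < num
  · simp only []
    rw [count_cnt_eq num (by omega)]
    set c := num.toNat.divisors.card with hc
    have hn0 : num.toNat ≠ 0 := by omega
    have hpar := divisors_card_parity num.toNat hn0
    have hsqiff := countBsearch_sq_iff num (by omega)
    have hmod : PySem.Int.mod (c : Int) 2 = ((c % 2 : ℕ) : Int) := by
      rw [PySem.Int.mod_eq_emod_of_pos (by omega)]
      push_cast
      rfl
    unfold count_alt
    simp only [beq_iff_eq, hmod]
    by_cases hsq : countBsearch num 0 num * countBsearch num 0 num = num
    · have : c % 2 = 1 := hpar.mpr (hsqiff.mp hsq)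
      rw [if_neg (by omega), if_pos hsq]
      ring
    · have : c % 2 ≠ 1 := fun hcc => hsq (hsqiff.mpr (hpar.mp hcc))
      rw [if_pos (by omega), if_neg hsq]
  · simp only []
    rw [PySem.List.pyRange_one_eq_nil (by omega)]
    simp only [List.foldl_nil]
    rw [count_alt_nonpos num (by omega)]
    simp [PySem.Int.mod]
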